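-- pv_equiv track=rewrite | github.com/MarcinSerafin03/bit-algo-start-24-25-WDI | Zadania przed Kolokwium 1 - kiedys to posprzatam/zad_1_niewiadomo.py | zad2
-- ===== SOURCE A (Python) =====
-- def decimal_to_base4(number):
--     base4 = 0
--     multiplier = 1
--
--     while number > 0:
--         remainder = number % 4
--         base4 += remainder * multiplier
--         number //= 4
--         multiplier *= 10
--
--     return base4
--
-- def check_4_correct(N4_1, N4_2):
--     N4_1_numbers = [False for _ in range(4)]
--     N4_2_numbers = [False for _ in range(4)]
--
--     while N4_1 > 0:
--         N4_1_numbers[N4_1 % 10] = True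
--         N4_1 //= 10
--
--     while N4_2 > 0:
--         N4_2_numbers[N4_2 % 10] = True
--         N4_2 //= 10
--
--     for i in range(4):
--         if N4_1_numbers[i] != N4_2_numbers[i]:
--             return False
--
--     return True
--
-- def zad2(T):
--     n = len(T)
--     longest = 1
--     for i in range(n):
--         longest_pretender = 1
--         for j in range(i+1, n):
--             if check_4_correct(decimal_to_base4(T[i]), decimal_to_base4(T[j])):
--                 longest_pretender += 1
--         longest = max(longest, longest_pretender)
--
--     return longest
-- ===== SOURCE B (Python) =====
-- def zad2(T):
--     # one pass: bucket-count the 16 possible base-4 digit-set signatures, then take the best bucket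
--     counts = [0] * 16
--     for x in T:
--         m = 0
--         while x > 0:
--             m |= 1 << (x % 4)
--             x //= 4
--         counts[m] += 1
--     best = 1
--     for c in counts:
--         if c > best:
--             best = c
--     return best
-- ===== Notes on version B (the rewrite author's own statement) =====
-- stated objective: faster
-- what changed: Replaced the quadratic pairwise digit-set comparison (decimal-encoded base-4 digits re-extracted for every pair) by a single pass that computes each element's 4-bit base-4 digit-set signature once and bucket-counts the 16 possible signatures, returning max(best bucket, 1).
import Mathlib
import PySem

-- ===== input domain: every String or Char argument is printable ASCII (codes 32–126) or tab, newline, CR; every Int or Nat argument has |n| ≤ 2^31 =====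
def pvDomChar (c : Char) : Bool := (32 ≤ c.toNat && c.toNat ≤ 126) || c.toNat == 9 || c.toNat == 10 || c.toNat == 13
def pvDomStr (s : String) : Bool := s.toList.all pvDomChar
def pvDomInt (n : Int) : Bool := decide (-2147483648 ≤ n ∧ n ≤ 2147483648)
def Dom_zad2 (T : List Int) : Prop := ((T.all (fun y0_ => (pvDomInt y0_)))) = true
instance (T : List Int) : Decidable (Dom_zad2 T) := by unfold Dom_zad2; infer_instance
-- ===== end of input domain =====

-- B replaces A's O(n^2) pairwise digit-set comparison by one O(n) pass that bucket-counts
-- the 16 possible base-4 digit-set signatures (faster; return value proved equal on all inputs).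

-- ===== PORT A =====
lemma pvDiv4Lt {x : Int} (h : 0 < x) : (PySem.Int.floordiv x 4).toNat < x.toNat := by
  rw [PySem.Int.floordiv_eq_ediv_of_pos (by norm_num)]; omega

lemma pvDiv10Lt {x : Int} (h : 0 < x) : (PySem.Int.floordiv x 10).toNat < x.toNat := by
  rw [PySem.Int.floordiv_eq_ediv_of_pos (by norm_num)]; omega

def d4go (number base4 multiplier : Int) : Int :=
  if h : 0 < number then
    d4go (PySem.Int.floordiv number 4) (base4 + PySem.Int.mod number 4 * multiplier) (multiplier * 10)
  else base4
termination_by number.toNat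
decreasing_by exact pvDiv4Lt h

def decimal_to_base4 (number : Int) : Int := d4go number 0 1

def markGo (N : Int) (marks : List Bool) : List Bool :=
  if h : 0 < N then
    markGo (PySem.Int.floordiv N 10) (PySem.List.pySetD marks (PySem.Int.mod N 10) true)
  else marks
termination_by N.toNat
decreasing_by exact pvDiv10Lt h

def check_4_correct (N1 N2 : Int) : Bool :=
  let m1 := markGo N1 [false, false, false, false]
  let m2 := markGo N2 [false, false, false, false]
  (PySem.List.pyRange 0 4 1).all (fun i => PySem.List.pyGetD m1 i false == PySem.List.pyGetD m2 i false)

def zad2 (T : List Int) : Int :=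
  let n : Int := T.length
  (PySem.List.pyRange 0 n 1).foldl (fun longest i =>
    let lp := (PySem.List.pyRange (i + 1) n 1).foldl (fun lp j =>
      if check_4_correct (decimal_to_base4 (PySem.List.pyGetD T i 0))
          (decimal_to_base4 (PySem.List.pyGetD T j 0)) then lp + 1 else lp) 1
    max longest lp) 1

-- ===== PORT B =====
def sigGo (x m : Int) : Int :=
  if h : 0 < x then
    sigGo (PySem.Int.floordiv x 4) (PySem.Int.bor m ((1 : Int) <<< (PySem.Int.mod x 4).toNat))
  else m
termination_by x.toNat
decreasing_by exact pvDiv4Lt h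

def sig4 (x : Int) : Int := sigGo x 0

def zad2_alt (T : List Int) : Int :=
  let counts := T.foldl (fun counts x =>
    let m := sig4 x
    PySem.List.pySetD counts m (PySem.List.pyGetD counts m 0 + 1)) (List.replicate 16 (0 : Int))
  counts.foldl (fun best c => if best < c then c else best) 1

-- ===== PRECONDITION & SPEC =====
def Spec_zad2 (T : List Int) (out : Int) : Prop := out = zad2_alt T
instance (T : List Int) (out : Int) : Decidable (Spec_zad2 T out) := by unfold Spec_zad2; infer_instance

-- ===== CLAIM (what is proved, stated in full; the proofs are below) =====
def Claim_equal_zad2 : Prop := ∀ (T : List Int), Dom_zad2 T → Spec_zad2 T (zad2 T)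

-- ===== LEMMAS AND PROOFS =====

-- encoding of a 4-bool mark list as the bitmask integer
def encL (l : List Bool) : Int :=
  (if l.getD 0 false then 1 else 0) + (if l.getD 1 false then 2 else 0)
  + (if l.getD 2 false then 4 else 0) + (if l.getD 3 false then 8 else 0)

-- max run count ("most frequent element, scanning from the left")
def mc : List Int → Int
  | [] => 0
  | s :: l => max (1 + (l.count s : Int)) (mc l)

lemma d4go_acc (x : Int) : ∀ acc mult : Int, d4go x acc mult = acc + mult * d4go x 0 1 := by
  intro acc mult
  by_cases h : 0 < x
  · have e1 : d4go x 0 1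
        = 0 + PySem.Int.mod x 4 * 1 + 1 * 10 * d4go (PySem.Int.floordiv x 4) 0 1 := by
      conv_lhs => rw [d4go, dif_pos h]
      rw [d4go_acc (PySem.Int.floordiv x 4)]
    conv_lhs => rw [d4go, dif_pos h]
    rw [d4go_acc (PySem.Int.floordiv x 4), e1]
    ring
  · conv_lhs => rw [d4go, dif_neg h]
    conv_rhs => rw [d4go, dif_neg h]
    ring
termination_by x.toNat
decreasing_by all_goals exact pvDiv4Lt h

lemma d4_zero {x : Int} (h : ¬ 0 < x) : decimal_to_base4 x = 0 := by
  rw [decimal_to_base4, d4go, dif_neg h]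

lemma d4_step {x : Int} (h : 0 < x) :
    decimal_to_base4 x = PySem.Int.mod x 4 + 10 * decimal_to_base4 (PySem.Int.floordiv x 4) := by
  simp only [decimal_to_base4]
  conv_lhs => rw [d4go, dif_pos h]
  rw [d4go_acc]
  ring

lemma d4_nonneg (x : Int) : 0 ≤ decimal_to_base4 x := by
  by_cases h : 0 < x
  · rw [d4_step h]
    have h1 := PySem.Int.mod_nonneg x (b := 4) (by norm_num)
    have h2 := d4_nonneg (PySem.Int.floordiv x 4)
    omega
  · rw [d4_zero h]
termination_by x.toNat
decreasing_by exact pvDiv4Lt h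

lemma d4_pos {x : Int} (h : 0 < x) : 0 < decimal_to_base4 x := by
  rw [d4_step h]
  have h1 := PySem.Int.mod_nonneg x (b := 4) (by norm_num)
  by_cases h2 : 0 < PySem.Int.floordiv x 4
  · have := d4_pos h2
    omega
  · have h3 : PySem.Int.mod x 4 ≠ 0 := by
      rw [PySem.Int.mod_eq_emod_of_pos (by norm_num)] at *
      rw [PySem.Int.floordiv_eq_ediv_of_pos (by norm_num)] at h2
      omega
    have := d4_nonneg (PySem.Int.floordiv x 4)
    omega
termination_by x.toNat
decreasing_by exact pvDiv4Lt h

lemma d4_mod10 {x : Int} (h : 0 < x) :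
    PySem.Int.mod (decimal_to_base4 x) 10 = PySem.Int.mod x 4 := by
  rw [d4_step h, PySem.Int.mod_eq_emod_of_pos (by norm_num),
    PySem.Int.mod_eq_emod_of_pos (a := x) (by norm_num)]
  have h1 := PySem.Int.mod_nonneg x (b := 4) (by norm_num)
  have h2 := PySem.Int.mod_lt x (b := 4) (by norm_num)
  have h3 := d4_nonneg (PySem.Int.floordiv x 4)
  rw [PySem.Int.mod_eq_emod_of_pos (a := x) (by norm_num)] at h1 h2
  omega

lemma d4_div10 {x : Int} (h : 0 < x) :
    PySem.Int.floordiv (decimal_to_base4 x) 10 = decimal_to_base4 (PySem.Int.floordiv x 4) := by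
  rw [d4_step h, PySem.Int.floordiv_eq_ediv_of_pos (by norm_num)]
  have h1 := PySem.Int.mod_nonneg x (b := 4) (by norm_num)
  have h2 := PySem.Int.mod_lt x (b := 4) (by norm_num)
  omega

lemma markGo_zero {N : Int} (h : ¬ 0 < N) (l : List Bool) : markGo N l = l := by
  rw [markGo, dif_neg h]

lemma markGo_step {N : Int} (h : 0 < N) (l : List Bool) :
    markGo N l = markGo (PySem.Int.floordiv N 10) (PySem.List.pySetD l (PySem.Int.mod N 10) true) := by
  conv_lhs => rw [markGo, dif_pos h]

lemma markGo_length (N : Int) (l : List Bool) : (markGo N l).length = l.length := by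
  by_cases h : 0 < N
  · rw [markGo_step h, markGo_length, PySem.List.length_pySetD]
  · rw [markGo_zero h]
termination_by N.toNat
decreasing_by exact pvDiv10Lt h

lemma sigGo_zero {x : Int} (h : ¬ 0 < x) (m : Int) : sigGo x m = m := by
  rw [sigGo, dif_neg h]

lemma sigGo_step {x : Int} (h : 0 < x) (m : Int) :
    sigGo x m = sigGo (PySem.Int.floordiv x 4)
      (PySem.Int.bor m ((1 : Int) <<< (PySem.Int.mod x 4).toNat)) := by
  conv_lhs => rw [sigGo, dif_pos h]

lemma sig_encL (x : Int) :
    ∀ b0 b1 b2 b3 : Bool,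
      sigGo x (encL [b0, b1, b2, b3]) = encL (markGo (decimal_to_base4 x) [b0, b1, b2, b3]) := by
  intro b0 b1 b2 b3
  by_cases h : 0 < x
  · have hm0 := PySem.Int.mod_nonneg x (b := 4) (by norm_num)
    have hm4 := PySem.Int.mod_lt x (b := 4) (by norm_num)
    rw [markGo_step (d4_pos h), d4_mod10 h, d4_div10 h, sigGo_step h]
    have hd : PySem.Int.mod x 4 = 0 ∨ PySem.Int.mod x 4 = 1 ∨ PySem.Int.mod x 4 = 2
        ∨ PySem.Int.mod x 4 = 3 := by omega
    rcases hd with hd | hd | hd | hd <;> rw [hd]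
    · have hset : PySem.List.pySetD [b0, b1, b2, b3] 0 true = [true, b1, b2, b3] := by
        cases b0 <;> cases b1 <;> cases b2 <;> cases b3 <;> decide
      have hb : PySem.Int.bor (encL [b0, b1, b2, b3]) ((1 : Int) <<< (0 : Int).toNat)
          = encL [true, b1, b2, b3] := by
        cases b0 <;> cases b1 <;> cases b2 <;> cases b3 <;> decide
      rw [hset, hb, sig_encL (PySem.Int.floordiv x 4)]
    · have hset : PySem.List.pySetD [b0, b1, b2, b3] 1 true = [b0, true, b2, b3] := by
        cases b0 <;> cases b1 <;> cases b2 <;> cases b3 <;> decide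
      have hb : PySem.Int.bor (encL [b0, b1, b2, b3]) ((1 : Int) <<< (1 : Int).toNat)
          = encL [b0, true, b2, b3] := by
        cases b0 <;> cases b1 <;> cases b2 <;> cases b3 <;> decide
      rw [hset, hb, sig_encL (PySem.Int.floordiv x 4)]
    · have hset : PySem.List.pySetD [b0, b1, b2, b3] 2 true = [b0, b1, true, b3] := by
        cases b0 <;> cases b1 <;> cases b2 <;> cases b3 <;> decide
      have hb : PySem.Int.bor (encL [b0, b1, b2, b3]) ((1 : Int) <<< (2 : Int).toNat)
          = encL [b0, b1, true, b3] := by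
        cases b0 <;> cases b1 <;> cases b2 <;> cases b3 <;> decide
      rw [hset, hb, sig_encL (PySem.Int.floordiv x 4)]
    · have hset : PySem.List.pySetD [b0, b1, b2, b3] 3 true = [b0, b1, b2, true] := by
        cases b0 <;> cases b1 <;> cases b2 <;> cases b3 <;> decide
      have hb : PySem.Int.bor (encL [b0, b1, b2, b3]) ((1 : Int) <<< (3 : Int).toNat)
          = encL [b0, b1, b2, true] := by
        cases b0 <;> cases b1 <;> cases b2 <;> cases b3 <;> decide
      rw [hset, hb, sig_encL (PySem.Int.floordiv x 4)]
  · rw [sigGo_zero h, d4_zero h, markGo_zero (by norm_num)]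
termination_by x.toNat
decreasing_by all_goals exact pvDiv4Lt h

lemma len4_shape (l : List Bool) (h : l.length = 4) :
    ∃ a b c d : Bool, l = [a, b, c, d] := by
  match l, h with
  | [a, b, c, d], _ => exact ⟨a, b, c, d, rfl⟩

lemma sig4_eq_encL (x : Int) :
    sig4 x = encL (markGo (decimal_to_base4 x) [false, false, false, false]) := by
  have := sig_encL x false false false false
  simpa [sig4, encL] using this

lemma encL_inj (a b c d a' b' c' d' : Bool) :
    (encL [a, b, c, d] == encL [a', b', c', d'])
      = ([a, b, c, d] == [a', b', c', d']) := by
  cases a <;> cases b <;> cases c <;> cases d <;>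
    cases a' <;> cases b' <;> cases c' <;> cases d' <;> decide

lemma check_eq (a b : Int) :
    check_4_correct (decimal_to_base4 a) (decimal_to_base4 b) = (sig4 a == sig4 b) := by
  obtain ⟨a0, a1, a2, a3, ha⟩ := len4_shape (markGo (decimal_to_base4 a) [false, false, false, false])
    (by rw [markGo_length]; rfl)
  obtain ⟨c0, c1, c2, c3, hc⟩ := len4_shape (markGo (decimal_to_base4 b) [false, false, false, false])
    (by rw [markGo_length]; rfl)
  rw [check_4_correct, sig4_eq_encL, sig4_eq_encL, ha, hc, encL_inj]
  cases a0 <;> cases a1 <;> cases a2 <;> cases a3 <;>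
    cases c0 <;> cases c1 <;> cases c2 <;> cases c3 <;> decide

lemma encL_bounds (l : List Bool) : 0 ≤ encL l ∧ encL l < 16 := by
  unfold encL; split_ifs <;> norm_num

lemma sig4_bounds (x : Int) : 0 ≤ sig4 x ∧ sig4 x < 16 := by
  rw [sig4_eq_encL]; exact encL_bounds _

lemma inner_eq (T : List Int) (i : Int) (h0 : 0 ≤ i) (hi : i < (T.length : Int)) :
    (PySem.List.pyRange (i + 1) (T.length : Int) 1).foldl
      (fun lp j => if check_4_correct (decimal_to_base4 (PySem.List.pyGetD T i 0))
          (decimal_to_base4 (PySem.List.pyGetD T j 0)) then lp + 1 else lp) (1 : Int)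
    = 1 + (((T.map sig4).drop (i.toNat + 1)).count ((T.map sig4).getD i.toNat 0) : Int) := by
  rw [PySem.List.foldl_pyRange_pyGetD' T 0
    (fun lp y => if check_4_correct (decimal_to_base4 (PySem.List.pyGetD T i 0))
      (decimal_to_base4 y) then lp + 1 else lp) 1 (by omega)]
  rw [PySem.List.foldl_congr_mem _ _
    (fun lp y => if (fun y => sig4 y == sig4 (PySem.List.pyGetD T i 0)) y then lp + 1 else lp) 1
    (by intro acc x _; rw [check_eq]; rw [Bool.beq_comm])]
  rw [PySem.List.foldl_if_add_one]
  have htn : (i + 1).toNat = i.toNat + 1 := by omega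
  rw [htn]
  congr 1
  have hlt : i.toNat < T.length := by omega
  rw [← List.map_drop, List.getD_eq_getElem _ _ (by simpa using hlt), List.getElem_map,
    List.count_eq_countP, List.countP_map]
  simp only [PySem.List.pyGetD_eq_getElem T 0 h0 hi]
  rfl

lemma foldl_max_mc (L : List Int) : ∀ c : Int, 1 ≤ c →
    (List.range L.length).foldl
      (fun acc k => max acc (1 + ((L.drop (k + 1)).count (L.getD k 0) : Int))) c
    = max c (mc L) := by
  induction L with
  | nil => intro c hc; simp [mc]; omega
  | cons s l ih =>
    intro c hc
    rw [List.length_cons, List.range_succ_eq_map, List.foldl_cons, List.foldl_map]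
    simp only [List.drop_succ_cons, List.drop_zero, List.getD_cons_zero, List.getD_cons_succ]
    rw [ih _ (le_trans hc (le_max_left _ _))]
    rw [mc, max_assoc]

lemma zad2_eq (T : List Int) : zad2 T = max 1 (mc (T.map sig4)) := by
  simp only [zad2]
  rw [PySem.List.foldl_congr_mem _ _
    (fun longest i => max longest
      (1 + (((T.map sig4).drop (i.toNat + 1)).count ((T.map sig4).getD i.toNat 0) : Int))) 1
    (by
      intro acc i hmem
      rw [PySem.List.mem_pyRange_one] at hmem
      rw [inner_eq T i hmem.1 hmem.2])]
  rw [PySem.List.pyRange_zero_nat, List.foldl_map]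
  have : ∀ (k : Nat), ((k : Int)).toNat = k := fun k => Int.toNat_natCast k
  simp only [this]
  rw [show T.length = (T.map sig4).length from by simp]
  rw [foldl_max_mc (T.map sig4) 1 le_rfl]

lemma counts_inv (L : List Int) : ∀ c : List Int, c.length = 16 →
    L.foldl (fun counts x =>
      PySem.List.pySetD counts (sig4 x) (PySem.List.pyGetD counts (sig4 x) 0 + 1)) c
    = (List.range 16).map (fun k => c.getD k 0 + ((L.map sig4).count (k : Int) : Int)) := by
  induction L with
  | nil =>
    intro c hc
    simp only [List.foldl_nil, List.map_nil, List.count_nil, Nat.cast_zero, add_zero]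
    apply List.ext_getElem (by simp [hc])
    intro n h1 h2
    simp at h2
    rw [List.getElem_map, List.getElem_range, List.getD_eq_getElem c 0 (by omega)]
  | cons x l ih =>
    intro c hc
    have hb := sig4_bounds x
    rw [List.foldl_cons, ih _ (by rw [PySem.List.length_pySetD]; exact hc)]
    apply List.map_congr_left
    intro k hk
    have hk16 : k < 16 := List.mem_range.mp hk
    rw [List.map_cons, List.count_cons, PySem.List.pySetD_of_nonneg c _ hb.1]
    have hset : (c.set (sig4 x).toNat (PySem.List.pyGetD c (sig4 x) 0 + 1)).getD k 0
        = if (sig4 x).toNat = k then PySem.List.pyGetD c (sig4 x) 0 + 1 else c.getD k 0 := by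
      rw [List.getD_eq_getElem _ 0 (by simp; omega), List.getElem_set,
        List.getD_eq_getElem c 0 (by omega)]
    rw [hset]
    by_cases he : (sig4 x).toNat = k
    · have hxk : sig4 x = (k : Int) := by omega
      rw [if_pos he, if_pos (by exact beq_iff_eq.mpr hxk),
        PySem.List.pyGetD_eq_getElem c 0 hb.1 (by rw [hc]; exact_mod_cast hb.2),
        List.getD_eq_getElem c 0 (by omega)]
      simp only [he]
      push_cast
      ring
    · have hxk : ¬ (sig4 x == (k : Int)) = true := by
        simp only [beq_iff_eq]; omega
      rw [if_neg he, if_neg hxk]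
      push_cast
      ring

lemma count_le_mc (L : List Int) (s : Int) : (L.count s : Int) ≤ mc L := by
  induction L with
  | nil => simp [mc]
  | cons h t ih =>
    rw [List.count_cons, mc]
    by_cases hs : (h == s) = true
    · have : h = s := beq_iff_eq.mp hs
      subst this
      refine le_trans ?_ (le_max_left _ _)
      simp
    · rw [if_neg hs]
      refine le_trans ?_ (le_max_right _ _)
      simpa using ih

lemma mc_attained (L : List Int) : mc L = 0 ∨ ∃ s ∈ L, mc L = (L.count s : Int) := by
  induction L with
  | nil => left; rfl
  | cons h t ih =>
    rcases max_choice (1 + (t.count h : Int)) (mc t) with hm | hm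
    · right
      refine ⟨h, List.mem_cons_self, ?_⟩
      rw [mc, hm, List.count_cons, if_pos (by simp)]
      push_cast; ring
    · have hAB := le_max_left (1 + (t.count h : Int)) (mc t)
      rw [hm] at hAB
      rcases ih with h0 | ⟨s, hs, hmc⟩
      · exfalso
        have := Int.natCast_nonneg (t.count h)
        omega
      · right
        refine ⟨s, List.mem_cons_of_mem _ hs, ?_⟩
        rw [mc, hm, hmc, List.count_cons]
        by_cases hhs : (h == s) = true
        · exfalso
          have : h = s := beq_iff_eq.mp hhs
          subst this
          rw [hmc] at hAB
          omega
        · rw [if_neg hhs]; push_cast; ring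

lemma foldl_if_max (cs : List Int) (b : Int) :
    cs.foldl (fun best c => if best < c then c else best) b = cs.foldl max b := by
  rw [PySem.List.foldl_congr_mem]
  intro acc x _
  rcases lt_or_ge acc x with h | h
  · rw [if_pos h, max_eq_right h.le]
  · rw [if_neg (not_lt.mpr h), max_eq_left h]

lemma foldl_max_count (L : List Int) (hL : ∀ s ∈ L, 0 ≤ s ∧ s < 16) :
    ((List.range 16).map (fun k : Nat => (L.count (k : Int) : Int))).foldl max 1 = max 1 (mc L) := by
  apply le_antisymm
  · rcases PySem.List.foldl_max_mem ((List.range 16).map (fun k : Nat => (L.count (k : Int) : Int))) 1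
      with hm | hm
    · rw [hm]; exact le_max_left _ _
    · obtain ⟨k, _, hk⟩ := List.mem_map.mp hm
      rw [← hk]
      exact le_trans (count_le_mc L _) (le_max_right _ _)
  · apply max_le
    · exact (PySem.List.le_foldl_max _ _).1
    · rcases mc_attained L with h0 | ⟨s, hs, hmc⟩
      · rw [h0]
        exact le_trans (by norm_num) (PySem.List.le_foldl_max _ _).1
      · rw [hmc]
        obtain ⟨hs0, hs16⟩ := hL s hs
        apply (PySem.List.le_foldl_max _ _).2
        apply List.mem_map.mpr
        have hmem : s.toNat ∈ List.range 16 := List.mem_range.mpr (by omega)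
        refine ⟨s.toNat, hmem, ?_⟩
        rw [Int.toNat_of_nonneg hs0]

lemma zad2_alt_eq (T : List Int) : zad2_alt T = max 1 (mc (T.map sig4)) := by
  simp only [zad2_alt]
  rw [counts_inv T (List.replicate 16 0) (by simp)]
  have hgd : ∀ k : Nat, (List.replicate 16 (0 : Int)).getD k 0 = 0 := by
    intro k
    rcases lt_or_ge k 16 with h | h
    · rw [List.getD_eq_getElem _ 0 (by simpa using h), List.getElem_replicate]
    · rw [List.getD_eq_default _ 0 (by simpa using h)]
  simp only [hgd, zero_add]
  rw [foldl_if_max, foldl_max_count]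
  intro s hs
  obtain ⟨x, _, hx⟩ := List.mem_map.mp hs
  rw [← hx]
  exact sig4_bounds x

lemma zad2_eq_alt (T : List Int) : zad2 T = zad2_alt T := by
  rw [zad2_eq, zad2_alt_eq]

-- ===== VERDICT (by name: the statement is the Claim_ definition above) =====
theorem zad2_spec : Claim_equal_zad2 := by
  intro T _
  unfold Spec_zad2
  exact zad2_eq_alt T
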